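-- pv_equiv track=rewrite | github.com/pypi-data/pypi-mirror-202 | packages/pytest/pytest-7.3.0.tar.gz/pytest-7.3.0/src/_pytest/nodes.py | iterparentnodeids
-- ===== SOURCE A (Python) =====
-- from typing import Iterator
-- from typing import Optional
--
-- SEP = "/"
--
-- def iterparentnodeids(nodeid: str) -> Iterator[str]:
--     """Return the parent node IDs of a given node ID, inclusive.
--
--     For the node ID
--
--         "testing/code/test_excinfo.py::TestFormattedExcinfo::test_repr_source"
--
--     the result would be
--
--         ""
--         "testing"
--         "testing/code"
--         "testing/code/test_excinfo.py"
--         "testing/code/test_excinfo.py::TestFormattedExcinfo"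
--         "testing/code/test_excinfo.py::TestFormattedExcinfo::test_repr_source"
--
--     Note that / components are only considered until the first ::.
--     """
--     pos = 0
--     first_colons: Optional[int] = nodeid.find("::")
--     if first_colons == -1:
--         first_colons = None
--     # The root Session node - always present.
--     yield ""
--     # Eagerly consume SEP parts until first colons.
--     while True:
--         at = nodeid.find(SEP, pos, first_colons)
--         if at == -1:
--             break
--         if at > 0:
--             yield nodeid[:at]
--         pos = at + len(SEP)
--     # Eagerly consume :: parts.
--     while True:
--         at = nodeid.find("::", pos)
--         if at == -1:
--             break
--         if at > 0:
--             yield nodeid[:at]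
--         pos = at + len("::")
--     # The node ID itself.
--     if nodeid:
--         yield nodeid
-- ===== SOURCE B (Python) =====
-- SEP = "/"
--
-- def iterparentnodeids(nodeid):
--     """Split-based re-implementation: split the path head on '/' and the tail on
--     '::', walking each list with a cumulative-prefix accumulator."""
--     yield ""
--     first = nodeid.find("::")
--     head = nodeid if first == -1 else nodeid[:first]
--     acc = ""
--     parts = head.split(SEP)
--     acc = parts[0]
--     for p in parts[1:]:
--         if acc:
--             yield acc
--         acc = acc + SEP + p
--     if first == -1:
--         if nodeid:
--             yield nodeid
--     else:
--         for p in nodeid[first + 2:].split("::"):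
--             if acc:
--                 yield acc
--             acc = acc + "::" + p
--         yield nodeid
-- ===== Notes on version B (the rewrite author's own statement) =====
-- stated objective: simpler
-- what changed: A scans with two stateful find(sep, pos, end) while-loops over the whole nodeid; B splits the path head on the slash separator and the remainder on the double-colon separator once, then walks the parts with a cumulative-prefix accumulator.
import Mathlib
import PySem

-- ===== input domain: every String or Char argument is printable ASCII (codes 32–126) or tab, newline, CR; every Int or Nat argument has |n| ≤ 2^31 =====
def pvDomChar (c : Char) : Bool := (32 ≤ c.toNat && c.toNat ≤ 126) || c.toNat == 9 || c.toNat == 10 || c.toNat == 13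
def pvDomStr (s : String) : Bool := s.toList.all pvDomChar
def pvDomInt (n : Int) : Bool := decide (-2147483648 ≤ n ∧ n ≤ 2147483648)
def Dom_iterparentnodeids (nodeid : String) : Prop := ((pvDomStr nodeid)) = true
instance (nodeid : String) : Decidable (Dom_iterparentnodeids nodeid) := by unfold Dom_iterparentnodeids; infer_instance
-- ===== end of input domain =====

-- B replaces A's two stateful find(…, pos, end)-scanning while-loops by splitting the
-- head on "/" and the tail on "::" and walking the parts with a cumulative-prefix
-- accumulator (objective: simpler decomposition, same cost).

-- ===== PORT A =====
-- Both Python while-loops have the same shape (find sep from pos with an optional end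
-- bound; yield nodeid[:at] if at > 0; pos = at + len(sep)); one fueled helper
-- transliterates that loop, instantiated with sep = "/" (end = first_colons) and
-- sep = "::" (end = None).  Fuel s.length+1 bounds the iterations (pos strictly grows).
def pvFindLoop (s : List Char) (sep : List Char) (end? : Option Int) :
    Nat → Int → List (List Char) → Int × List (List Char)
  | 0, pos, acc => (pos, acc)
  | fuel+1, pos, acc =>
    let a := PySem.Chars.findFrom s sep pos end?
    if a = -1 then (pos, acc)
    else pvFindLoop s sep end? fuel (a + sep.length)
      (acc ++ if 0 < a then [PySem.Chars.slice s none (some a)] else [])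

def iterparentnodeids (nodeid : String) : List String :=
  let s := nodeid.toList
  let f := PySem.Chars.find s [':', ':']
  let firstColons : Option Int := if f = -1 then none else some f
  -- yield ""; then the SEP loop, then the :: loop, then nodeid itself if nonempty
  let st := pvFindLoop s ['/'] firstColons (s.length + 1) 0 [[]]
  let out := pvFindLoop s [':', ':'] none (s.length + 1) st.1 st.2
  (out.2 ++ if s = [] then [] else [s]).map String.ofList

-- ===== PORT B =====
-- pvWalk sep acc ps: for each part, yield acc if nonempty, then extend acc by sep ++ part;
-- returns (final accumulator, yields) — the 'for p in parts: if acc: yield acc; acc += sep+p' loop of Source B.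
def pvWalk (sep : List Char) : List Char → List (List Char) → List Char × List (List Char)
  | acc, [] => (acc, [])
  | acc, p :: rest =>
    let y := if acc = [] then [] else [acc]
    let r := pvWalk sep (acc ++ sep ++ p) rest
    (r.1, y ++ r.2)

def iterparentnodeids_alt (nodeid : String) : List String :=
  let s := nodeid.toList
  let first := PySem.Chars.find s [':', ':']
  let head := if first = -1 then s else PySem.Chars.slice s none (some first)
  let parts := PySem.Chars.splitOn head ['/']
  let w := pvWalk ['/'] (parts.headD []) parts.tail
  let rest :=
    if first = -1 then (if s = [] then [] else [s])
    else
      let w2 := pvWalk [':', ':'] w.1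
        (PySem.Chars.splitOn (PySem.Chars.slice s (some (first + 2)) none) [':', ':'])
      w2.2 ++ [s]
  (([[]] ++ w.2) ++ rest).map String.ofList

-- ===== PRECONDITION & SPEC =====
def Spec_iterparentnodeids (nodeid : String) (out : List String) : Prop := out = iterparentnodeids_alt nodeid
instance (nodeid : String) (out : List String) : Decidable (Spec_iterparentnodeids nodeid out) := by unfold Spec_iterparentnodeids; infer_instance

-- ===== CLAIM (what is proved, stated in full; the proofs are below) =====
def Claim_equal_iterparentnodeids : Prop := ∀ (nodeid : String), Dom_iterparentnodeids nodeid → Spec_iterparentnodeids nodeid (iterparentnodeids nodeid)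

-- ===== LEMMAS AND PROOFS =====


-- Reference splitter: structural (char-by-char) form of Python's str.split(sep) for a
-- nonempty separator c0 :: sep'; the bridge between splitOn, find and the two ports.
def pvSplitRef (c0 : Char) (sep' : List Char) : List Char → List (List Char)
  | [] => [[]]
  | c :: rest =>
    if (c0 :: sep').isPrefixOf (c :: rest) then
      [] :: pvSplitRef c0 sep' (rest.drop sep'.length)
    else
      match pvSplitRef c0 sep' rest with
      | [] => [[]]
      | p :: ps => (c :: p) :: ps
termination_by t => t.length
decreasing_by
  · simp only [List.length_drop, List.length_cons]; omega
  · simp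

theorem pvSplitRef_ne_nil (c0 : Char) (sep' : List Char) (t : List Char) :
    pvSplitRef c0 sep' t ≠ [] := by
  fun_induction pvSplitRef c0 sep' t <;> simp_all

-- find.go index-shift
theorem pvGoShift (sub t : List Char) (k : Nat) :
    PySem.Chars.find.go sub t k =
      if PySem.Chars.find.go sub t 0 = -1 then -1 else PySem.Chars.find.go sub t 0 + k := by
  induction t generalizing k with
  | nil =>
    rw [PySem.Chars.find.go, PySem.Chars.find.go]
    split_ifs <;> push_cast <;> omega
  | cons c rest ih =>
    have hge : -1 ≤ PySem.Chars.find.go sub rest 0 := by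
      have := PySem.Chars.neg_one_le_find rest sub
      simpa [PySem.Chars.find] using this
    rw [PySem.Chars.find.go, PySem.Chars.find.go]
    by_cases hp : sub.isPrefixOf (c :: rest) = true
    · simp only [hp, if_true]; omega
    · simp only [hp]
      rw [ih (k+1), ih 1]
      push_cast
      split_ifs <;> omega

theorem pvFindConsPos (sub t : List Char) (h : sub.isPrefixOf t = true) :
    PySem.Chars.find t sub = 0 := by
  cases t with
  | nil =>
    have : sub = [] := by simpa using List.prefix_nil.mp (List.isPrefixOf_iff_prefix.mp h)
    subst this
    simp [PySem.Chars.find, PySem.Chars.find.go]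
  | cons c rest =>
    show PySem.Chars.find.go sub (c :: rest) 0 = 0
    rw [PySem.Chars.find.go]
    simp [h]

theorem pvFindConsNeg (sub : List Char) (c : Char) (t : List Char)
    (h : ¬ sub.isPrefixOf (c :: t) = true) :
    PySem.Chars.find (c :: t) sub =
      if PySem.Chars.find t sub = -1 then -1 else PySem.Chars.find t sub + 1 := by
  show PySem.Chars.find.go sub (c :: t) 0 = _
  rw [PySem.Chars.find.go]
  simp only [h]
  rw [pvGoShift]
  simp [PySem.Chars.find]

-- find via pvSplitRef: the first part's length, or -1 when there is a single part
theorem pvFindSplitRef (c0 : Char) (sep' t : List Char) (p : List Char) (ps : List (List Char))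
    (h : pvSplitRef c0 sep' t = p :: ps) :
    PySem.Chars.find t (c0 :: sep') = if ps = [] then -1 else (p.length : Int) := by
  fun_induction pvSplitRef c0 sep' t generalizing p ps with
  | case1 =>
    injection h.symm with h1 h2; subst h1; subst h2
    simp [PySem.Chars.find, PySem.Chars.find.go]
  | case2 c rest hp ih =>
    injection h with h1 h2; subst h1; subst h2
    rw [pvFindConsPos _ _ hp]
    simp [pvSplitRef_ne_nil]
  | case3 c rest hp hnil ih => exact absurd hnil (pvSplitRef_ne_nil c0 sep' rest)
  | case4 c rest hp p' ps' heq ih =>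
    injection h with h1 h2; subst h1; subst h2
    rw [pvFindConsNeg _ _ _ hp, ih p' ps' heq]
    rcases ps' with _ | ⟨p2, ps2⟩
    · simp
    · have : ¬ ((p'.length : Int) = -1) := by omega
      simp only [List.cons_ne_nil, if_false, this]
      push_cast [List.length_cons]; omega

-- structure of a split: single part = the whole string, else first part ++ sep ++ rest-string
theorem pvSRcons (c0 : Char) (sep' t : List Char) (p : List Char) (ps : List (List Char))
    (h : pvSplitRef c0 sep' t = p :: ps) :
    (ps = [] ∧ t = p) ∨
      (∃ t', t = p ++ (c0 :: sep') ++ t' ∧ pvSplitRef c0 sep' t' = ps) := by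
  fun_induction pvSplitRef c0 sep' t generalizing p ps with
  | case1 =>
    injection h.symm with h1 h2; subst h1; subst h2
    exact Or.inl ⟨rfl, rfl⟩
  | case2 c rest hp ih =>
    injection h with h1 h2; subst h1; subst h2
    refine Or.inr ⟨rest.drop sep'.length, ?_, rfl⟩
    have hpre := List.isPrefixOf_iff_prefix.mp hp
    obtain ⟨u, hu⟩ := hpre
    have hlen : sep'.length ≤ rest.length := by
      have := congrArg List.length hu
      simp at this; omega
    have : rest.drop sep'.length = u := by
      have := congrArg (List.drop (sep'.length + 1)) hu
      simpa [List.drop_append_of_le_length, List.drop_length] using this.symm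
    simp [this, ← hu]
  | case3 c rest hp hnil ih => exact absurd hnil (pvSplitRef_ne_nil c0 sep' rest)
  | case4 c rest hp p' ps' heq ih =>
    injection h with h1 h2; subst h1; subst h2
    rcases ih p' ps' heq with ⟨rfl, rfl⟩ | ⟨t', rfl, ht'⟩
    · exact Or.inl ⟨rfl, rfl⟩
    · exact Or.inr ⟨t', by simp, ht'⟩

theorem pvSRtake (c0 : Char) (sep' t : List Char) (p : List Char) (ps : List (List Char))
    (h : pvSplitRef c0 sep' t = p :: ps) : t.take p.length = p := by
  rcases pvSRcons c0 sep' t p ps h with ⟨_, rfl⟩ | ⟨t', rfl, _⟩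
  · exact List.take_length
  · rw [List.append_assoc, List.take_left]

-- splitOn computes pvSplitRef
theorem pvSplitOnGo (c0 : Char) (sep' : List Char) (fuel : Nat) :
    ∀ (l cur : List Char) (acc : List (List Char)), l.length < fuel →
    PySem.Chars.splitOn.go (c0 :: sep') fuel l cur acc =
      acc.reverse ++
        (match pvSplitRef c0 sep' l with
          | [] => [cur.reverse]
          | p :: ps => (cur.reverse ++ p) :: ps) := by
  induction fuel with
  | zero => intro l cur acc h; omega
  | succ fuel ih =>
    intro l cur acc h
    cases l with
    | nil =>
      rw [PySem.Chars.splitOn.go]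
      · simp [pvSplitRef]
      · omega
    | cons c rest =>
      rw [PySem.Chars.splitOn.go]
      by_cases hp : (c0 :: sep').isPrefixOf (c :: rest) = true
      · simp only [hp, if_true]
        have hlen : (List.drop (c0 :: sep').length (c :: rest)).length < fuel := by
          simp at h ⊢; omega
        rw [ih _ _ _ hlen]
        have hdrop : List.drop (c0 :: sep').length (c :: rest) = rest.drop sep'.length := by
          simp
        rw [hdrop]
        rw [pvSplitRef]; simp only [hp, if_true]
        rcases hsr : pvSplitRef c0 sep' (rest.drop sep'.length) with _ | ⟨p, ps⟩
        · exact absurd hsr (pvSplitRef_ne_nil _ _ _)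
        · simp
      · simp only [hp]
        have hlen : rest.length < fuel := by simp at h; omega
        rw [ih _ _ _ hlen]
        rw [pvSplitRef]; simp only [hp]
        rcases hsr : pvSplitRef c0 sep' rest with _ | ⟨p, ps⟩
        · exact absurd hsr (pvSplitRef_ne_nil _ _ _)
        · simp

theorem pvSplitOnEq (c0 : Char) (sep' t : List Char) :
    PySem.Chars.splitOn t (c0 :: sep') = pvSplitRef c0 sep' t := by
  show PySem.Chars.splitOn.go _ _ _ _ _ = _
  rw [pvSplitOnGo c0 sep' (t.length + 1) t [] [] (by omega)]
  rcases h : pvSplitRef c0 sep' t with _ | ⟨p, ps⟩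
  · exact absurd h (pvSplitRef_ne_nil c0 sep' t)
  · simp

-- findFrom with a start past the end of the list
theorem pvFindFromBig (u sub : List Char) (q : Nat) (h : u.length < q) :
    PySem.Chars.findFrom u sub (q : Int) none = -1 := by
  simp only [PySem.Chars.findFrom]
  have h1 : ¬ ((q : Int) < 0) := by omega
  have h2 : ((u.length : Int) < (q : Int)) := by exact_mod_cast h
  simp only [h1, if_false]
  rw [if_pos h2]

-- a bounded find(sep, pos, end) is an unbounded find on the take
theorem pvFindFromSome (s sub : List Char) (q fn : Nat) (hf : fn ≤ s.length) :
    PySem.Chars.findFrom s sub (q : Int) (some (fn : Int)) =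
      PySem.Chars.findFrom (s.take fn) sub (q : Int) none := by
  simp only [PySem.Chars.findFrom, List.length_take]
  have e1 : ¬ ((s.length : Int) < (fn : Int)) := by exact_mod_cast not_lt.mpr hf
  have e2 : ¬ ((fn : Int) < 0) := by omega
  have e3 : ¬ ((q : Int) < 0) := by omega
  have e4 : min fn s.length = fn := Nat.min_eq_left hf
  simp only [e1, e2, e3, if_false, e4, Int.toNat_natCast, List.take_take, min_self]

-- final position of the unbounded loop: a Nat position within the list
theorem pvPos (u sub : List Char) (hsub : sub ≠ []) :
    ∀ (fuel : Nat) (q : Nat) (acc : List (List Char)), q ≤ u.length →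
      ∃ q' : Nat, q' ≤ u.length ∧ (pvFindLoop u sub none fuel (q : Int) acc).1 = (q' : Int) := by
  intro fuel
  induction fuel with
  | zero => intro q acc hq; exact ⟨q, hq, rfl⟩
  | succ fuel ih =>
    intro q acc hq
    rw [pvFindLoop]
    by_cases ha : PySem.Chars.findFrom u sub (q : Int) none = -1
    · simp only [ha, reduceIte]
      exact ⟨q, hq, rfl⟩
    · simp only [if_neg ha]
      obtain ⟨hq_le, hpre, _⟩ := PySem.Chars.findFrom_natCast_spec u sub q hq ha
      set a := PySem.Chars.findFrom u sub (q : Int) none with hadef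
      have ha0 : 0 ≤ a := le_trans (by omega) hq_le
      have hlen : sub.length ≤ (u.drop a.toNat).length := hpre.length_le
      have hne : u.drop a.toNat ≠ [] := by
        intro hnil; rw [hnil] at hpre
        exact hsub (List.prefix_nil.mp hpre)
      have hat : a.toNat < u.length := by
        by_contra hc
        exact hne (List.drop_eq_nil_of_le (by omega))
      have hbound : a.toNat + sub.length ≤ u.length := by
        simp [List.length_drop] at hlen; omega
      have hcast : a + (sub.length : Int) = ((a.toNat + sub.length : Nat) : Int) := by
        push_cast; omega
      rw [hcast]
      exact ih (a.toNat + sub.length) _ hbound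

-- loop is the identity when the separator does not occur at all
theorem pvNoOcc (u sub : List Char) (hno : ¬ sub <:+: u) (fuel : Nat) (q : Nat)
    (acc : List (List Char)) (hq : q ≤ u.length) :
    pvFindLoop u sub none fuel (q : Int) acc = ((q : Int), acc) := by
  cases fuel with
  | zero => rfl
  | succ fuel =>
    rw [pvFindLoop]
    have ha : PySem.Chars.findFrom u sub (q : Int) none = -1 := by
      rw [PySem.Chars.findFrom_natCast_eq_neg_one_iff u sub q hq]
      intro hinf
      exact hno (hinf.trans (List.drop_suffix q u).isInfix)
    simp [ha]

-- find after dropping q ≤ (first occurrence) characters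
theorem pvFindDrop (s sub : List Char) (q fn : Nat)
    (h : PySem.Chars.find s sub = (fn : Int)) (hq : q ≤ fn) :
    PySem.Chars.find (s.drop q) sub = ((fn - q : Nat) : Int) := by
  have h0 : 0 ≤ PySem.Chars.find s sub := by omega
  obtain ⟨hpre, hmin⟩ := PySem.Chars.find_spec h0
  rw [h] at hpre hmin
  simp only [Int.toNat_natCast] at hpre hmin
  have hpre' : sub <+: (s.drop q).drop (fn - q) := by
    rw [List.drop_drop]
    have h' : q + (fn - q) = fn := by omega
    rwa [h']
  have hge : 0 ≤ PySem.Chars.find (s.drop q) sub := by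
    rw [PySem.Chars.find_nonneg_iff]
    exact hpre'.isInfix.trans (List.drop_suffix (fn - q) (s.drop q)).isInfix
  obtain ⟨hpre2, hmin2⟩ := PySem.Chars.find_spec hge
  set r := (PySem.Chars.find (s.drop q) sub).toNat with hr
  have hub : r ≤ fn - q := by
    by_contra hc
    exact (hmin2 (fn - q) (by omega)) hpre'
  have hlb : ¬ (r < fn - q) := by
    intro hc
    apply hmin (q + r) (by omega)
    have h' : List.drop (q + r) s = (s.drop q).drop r := by rw [List.drop_drop]
    rwa [h']
  have : r = fn - q := by omega
  omega

-- one step along the split structure: positions and prefixes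
theorem pvDropAdd (u : List Char) (q k : Nat) : u.drop (q + k) = (u.drop q).drop k := by
  rw [List.drop_drop]

theorem pvTakeStep (c0 : Char) (sep' u : List Char) (q : Nat) (p t' p2 : List Char)
    (ps2 : List (List Char)) (hq : q ≤ u.length)
    (hdrop : u.drop q = p ++ (c0 :: sep') ++ t')
    (h2 : pvSplitRef c0 sep' t' = p2 :: ps2) :
    u.drop (q + p.length + (sep'.length + 1)) = t'
    ∧ u.take (q + p.length) ++ (c0 :: sep') ++ p2
        = u.take (q + p.length + (sep'.length + 1) + p2.length)
    ∧ q + p.length + (sep'.length + 1) ≤ u.length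
    ∧ q + p.length < u.length := by
  have hlen : u.length - q = p.length + (sep'.length + 1) + t'.length := by
    have := congrArg List.length hdrop
    simp at this; omega
  have hd1 : u.drop (q + p.length) = (c0 :: sep') ++ t' := by
    rw [pvDropAdd, hdrop, List.append_assoc, List.drop_left]
  have hd2 : u.drop (q + p.length + (sep'.length + 1)) = t' := by
    rw [pvDropAdd u (q + p.length), hd1]
    have : (sep'.length + 1) = (c0 :: sep').length := by simp
    rw [this, List.drop_left]
  have ht1 : u.take (q + p.length + (sep'.length + 1)) = u.take (q + p.length) ++ (c0 :: sep') := by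
    rw [List.take_add, hd1]
    congr 1
    have : (sep'.length + 1) = (c0 :: sep').length := by simp
    rw [this, List.take_left]
  have ht2 : u.take (q + p.length + (sep'.length + 1) + p2.length)
      = u.take (q + p.length) ++ (c0 :: sep') ++ p2 := by
    rw [List.take_add, ht1, hd2, pvSRtake c0 sep' t' p2 ps2 h2]
  exact ⟨hd2, ht2.symm, by omega, by omega⟩

-- the walk's final accumulator is the whole scanned string
theorem pvWalkAcc (c0 : Char) (sep' u : List Char) :
    ∀ (ps : List (List Char)) (q : Nat) (p : List Char), q ≤ u.length →
      pvSplitRef c0 sep' (u.drop q) = p :: ps →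
      (pvWalk (c0 :: sep') (u.take (q + p.length)) ps).1 = u := by
  intro ps
  induction ps with
  | nil =>
    intro q p hq h
    rcases pvSRcons _ _ _ _ _ h with ⟨_, hp⟩ | ⟨t', _, ht'⟩
    · have hlen : p.length = u.length - q := by rw [← hp]; simp
      rw [pvWalk]
      have : q + p.length = u.length := by omega
      rw [this]
      exact List.take_of_length_le (le_refl _)
    · exact absurd ht' (pvSplitRef_ne_nil _ _ _)
  | cons p2 ps2 ih =>
    intro q p hq h
    rcases pvSRcons _ _ _ _ _ h with ⟨hps, _⟩ | ⟨t', hdrop, ht'⟩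
    · cases hps
    · obtain ⟨hd2, ht2, hle, _⟩ := pvTakeStep c0 sep' u q p t' p2 ps2 hq hdrop ht'
      rw [pvWalk]
      show (pvWalk (c0 :: sep') (u.take (q + p.length) ++ (c0 :: sep') ++ p2) ps2).1 = u
      rw [ht2]
      exact ih _ p2 hle (by rw [hd2]; exact ht')

-- the A-side scan loop produces exactly the walk's yields
theorem pvMain (c0 : Char) (sep' u : List Char) :
    ∀ (ps : List (List Char)) (fuel : Nat) (q : Nat) (p : List Char) (acc : List (List Char)),
      q ≤ u.length → u.length - q < fuel →
      pvSplitRef c0 sep' (u.drop q) = p :: ps →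
      (pvFindLoop u (c0 :: sep') none fuel (q : Int) acc).2
        = acc ++ (pvWalk (c0 :: sep') (u.take (q + p.length)) ps).2 := by
  intro ps
  induction ps with
  | nil =>
    intro fuel q p acc hq hfuel h
    have hfind : PySem.Chars.find (u.drop q) (c0 :: sep') = -1 := by
      rw [pvFindSplitRef _ _ _ _ _ h]; simp
    cases fuel with
    | zero => simp [pvFindLoop, pvWalk]
    | succ fuel =>
      rw [pvFindLoop]
      have ha : PySem.Chars.findFrom u (c0 :: sep') (q : Int) none = -1 := by
        rw [PySem.Chars.findFrom_natCast u _ q hq]; simp [hfind]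
      simp [ha, pvWalk]
  | cons p2 ps2 ih =>
    intro fuel q p acc hq hfuel h
    have hfind : PySem.Chars.find (u.drop q) (c0 :: sep') = (p.length : Int) := by
      rw [pvFindSplitRef _ _ _ _ _ h]; simp
    rcases pvSRcons _ _ _ _ _ h with ⟨hps, _⟩ | ⟨t', hdrop, ht'⟩
    · cases hps
    obtain ⟨hd2, ht2, hle, hlt⟩ := pvTakeStep c0 sep' u q p t' p2 ps2 hq hdrop ht'
    cases fuel with
    | zero => omega
    | succ fuel =>
      rw [pvFindLoop]
      have ha : PySem.Chars.findFrom u (c0 :: sep') (q : Int) none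
          = ((q + p.length : Nat) : Int) := by
        rw [PySem.Chars.findFrom_natCast u _ q hq, hfind]
        have hne : ¬ ((p.length : Int) = -1) := by omega
        simp only [hne, if_false]
        push_cast; ring
      rw [ha]
      have hne : ¬ (((q + p.length : Nat) : Int) = -1) := by omega
      simp only [hne, if_false]
      have hcast : ((q + p.length : Nat) : Int) + ((c0 :: sep').length : Nat)
          = ((q + p.length + (sep'.length + 1) : Nat) : Int) := by
        push_cast [List.length_cons]; ring
      rw [hcast]
      rw [ih fuel _ p2 _ hle (by omega) (by rw [hd2]; exact ht')]
      rw [pvWalk]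
      show acc ++ _ ++ (pvWalk (c0 :: sep') (u.take (q + p.length + (sep'.length + 1) + p2.length)) ps2).2
          = acc ++ ((if u.take (q + p.length) = [] then [] else [u.take (q + p.length)])
              ++ (pvWalk (c0 :: sep') (u.take (q + p.length) ++ (c0 :: sep') ++ p2) ps2).2)
      rw [ht2]
      have hune : u ≠ [] := by
        intro hnil; rw [hnil] at hlt; simp at hlt
      have hguard : (u.take (q + p.length) = []) ↔ (q + p.length = 0) := by
        rw [List.take_eq_nil_iff]
        simp [hune]
      have hslice : PySem.Chars.slice u none (some ((q + p.length : Nat) : Int))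
          = u.take (q + p.length) := by
        rw [PySem.Chars.slice_eq_listSlice, PySem.List.slice_to_natCast]
      by_cases h0 : q + p.length = 0
      · have : ¬ (0 < ((q + p.length : Nat) : Int)) := by omega
        simp [hguard.mpr h0]
        omega
      · have : (0 < ((q + p.length : Nat) : Int)) := by omega
        simp only [this, if_true, hslice]
        rw [if_neg (fun hc => h0 (hguard.mp hc))]
        simp [List.append_assoc]

-- bounded loop = unbounded loop on the take
theorem pvBound (s sub : List Char) (hsub : sub ≠ []) (fn : Nat) (hf : fn ≤ s.length) :
    ∀ (fuel : Nat) (q : Nat) (acc : List (List Char)),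
      pvFindLoop s sub (some (fn : Int)) fuel (q : Int) acc
        = pvFindLoop (s.take fn) sub none fuel (q : Int) acc := by
  intro fuel
  induction fuel with
  | zero => intro q acc; rfl
  | succ fuel ih =>
    intro q acc
    rw [pvFindLoop, pvFindLoop, pvFindFromSome s sub q fn hf]
    by_cases ha : PySem.Chars.findFrom (s.take fn) sub (q : Int) none = -1
    · simp [ha]
    · simp only [ha, if_false]
      have hq2 : q ≤ (s.take fn).length := by
        by_contra hc
        exact ha (pvFindFromBig (s.take fn) sub q (by omega))
      obtain ⟨hq_le, hpre, _⟩ := PySem.Chars.findFrom_natCast_spec (s.take fn) sub q hq2 ha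
      set a := PySem.Chars.findFrom (s.take fn) sub (q : Int) none with hadef
      have ha0 : 0 ≤ a := le_trans (by omega) hq_le
      have hne : (s.take fn).drop a.toNat ≠ [] := by
        intro hnil; rw [hnil] at hpre
        exact hsub (List.prefix_nil.mp hpre)
      have hat : a.toNat < (s.take fn).length := by
        by_contra hc
        exact hne (List.drop_eq_nil_of_le (by omega))
      have hatfn : a.toNat < fn := by
        rw [List.length_take_of_le hf] at hat; exact hat
      have hslice : PySem.Chars.slice s none (some a)
          = PySem.Chars.slice (s.take fn) none (some a) := by
        rw [← Int.toNat_of_nonneg ha0]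
        rw [PySem.Chars.slice_eq_listSlice, PySem.Chars.slice_eq_listSlice,
            PySem.List.slice_to_natCast, PySem.List.slice_to_natCast,
            List.take_take, Nat.min_eq_left (le_of_lt hatfn)]
      have hcast : a + (sub.length : Int) = ((a.toNat + sub.length : Nat) : Int) := by
        push_cast; omega
      rw [hslice, hcast, ih]

-- ===== VERDICT (by name: the statement is the Claim_ definition above) =====
theorem pvWalkConsSnd (sep acc p : List Char) (rest : List (List Char)) :
    (pvWalk sep acc (p :: rest)).2
      = (if acc = [] then [] else [acc]) ++ (pvWalk sep (acc ++ sep ++ p) rest).2 := rfl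

theorem iterparentnodeids_spec : Claim_equal_iterparentnodeids := by
  intro nodeid _
  unfold Spec_iterparentnodeids
  simp only [iterparentnodeids, iterparentnodeids_alt]
  set s := nodeid.toList with hs
  by_cases hf : PySem.Chars.find s [':', ':'] = -1
  · -- no "::" anywhere
    simp only [hf, reduceIte]
    rcases hsp : pvSplitRef '/' [] s with _ | ⟨p, ps⟩
    · exact absurd hsp (pvSplitRef_ne_nil _ _ _)
    have hs0 : pvSplitRef '/' [] (s.drop 0) = p :: ps := by simpa using hsp
    have hmain := pvMain '/' [] s ps (s.length + 1) 0 p [[]] (by omega) (by omega) hs0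
    obtain ⟨q', hq', hq'eq⟩ := pvPos s ['/'] (by simp) (s.length + 1) 0 [[]] (by omega)
    have hnoc : ¬ [':', ':'] <:+: s := by rw [← PySem.Chars.find_eq_neg_one_iff]; exact hf
    have hcast0 : ((0 : Nat) : Int) = (0 : Int) := rfl
    simp only [Nat.cast_zero] at hmain hq'eq
    have htk : s.take (0 + p.length) = p := by
      simpa using pvSRtake '/' [] (s.drop 0) p ps hs0
    rw [htk] at hmain
    rw [hq'eq, pvNoOcc s [':', ':'] hnoc (s.length + 1) q' _ hq', hmain]
    rw [pvSplitOnEq '/' [] s, hsp]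
    simp
  · -- "::" at position fn
    have h0f : 0 ≤ PySem.Chars.find s [':', ':'] := by
      have := PySem.Chars.neg_one_le_find s [':', ':']
      omega
    set fI := PySem.Chars.find s [':', ':'] with hfI
    set fn := fI.toNat with hfn
    have hfcast : fI = (fn : Int) := (Int.toNat_of_nonneg h0f).symm
    have hfle : fn ≤ s.length := by
      have := PySem.Chars.find_le_length s [':', ':']
      omega
    obtain ⟨hpre, -⟩ := PySem.Chars.find_spec (sub := [':', ':']) h0f
    rw [← hfI] at hpre
    have hfn2 : fn + 2 ≤ s.length := by
      have := hpre.length_le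
      simp [List.length_drop, ← hfn] at this
      omega
    have hsne : s ≠ [] := by
      intro hnil; rw [hnil] at hfn2; simp at hfn2
    simp only [hf, reduceIte]
    -- the head
    have hslhead : PySem.Chars.slice s none (some fI) = s.take fn := by
      rw [hfcast, PySem.Chars.slice_eq_listSlice, PySem.List.slice_to_natCast]
    -- A: SEP loop on s bounded by fI = SEP loop on the head
    have hbound := pvBound s ['/'] (by simp) fn hfle (s.length + 1) 0 [[]]
    have hcast0 : ((0 : Nat) : Int) = (0 : Int) := rfl
    rw [hcast0] at hbound
    rw [hfcast, hbound]
    -- MAIN on the head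
    rcases hsp : pvSplitRef '/' [] (s.take fn) with _ | ⟨p, ps⟩
    · exact absurd hsp (pvSplitRef_ne_nil _ _ _)
    have hhl : (s.take fn).length = fn := List.length_take_of_le hfle
    have hs0 : pvSplitRef '/' [] ((s.take fn).drop 0) = p :: ps := by simpa using hsp
    have hmain := pvMain '/' [] (s.take fn) ps (s.length + 1) 0 p [[]]
      (by omega) (by omega) hs0
    obtain ⟨q', hq', hq'eq⟩ := pvPos (s.take fn) ['/'] (by simp) (s.length + 1) 0 [[]] (by omega)
    simp only [Nat.cast_zero] at hmain hq'eq
    have htk : (s.take fn).take (0 + p.length) = p := by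
      simpa using pvSRtake '/' [] ((s.take fn).drop 0) p ps hs0
    rw [htk] at hmain
    have hwacc : (pvWalk ['/'] p ps).1 = s.take fn := by
      have := pvWalkAcc '/' [] (s.take fn) ps 0 p (by omega) hs0
      rwa [htk] at this
    rw [hq'eq, hmain]
    -- the colon loop: first step finds fn
    have hq'fn : q' ≤ fn := by omega
    have hfdrop : PySem.Chars.find (s.drop q') [':', ':'] = ((fn - q' : Nat) : Int) :=
      pvFindDrop s [':', ':'] q' fn (by rw [← hfcast, hfI]) hq'fn
    have hstep : PySem.Chars.findFrom s [':', ':'] ((q' : Nat) : Int) none = (fn : Int) := by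
      rw [PySem.Chars.findFrom_natCast s _ q' (le_trans hq'fn hfle), hfdrop]
      have : ¬ (((fn - q' : Nat) : Int) = -1) := by omega
      simp only [this, if_false]
      omega
    -- the tail parts
    rcases hsp2 : pvSplitRef ':' [':'] (s.drop (fn + 2)) with _ | ⟨p2, ps2⟩
    · exact absurd hsp2 (pvSplitRef_ne_nil _ _ _)
    -- s decomposes at the first "::"
    have hsdec : s.drop 0 = s.take fn ++ ':' :: [':'] ++ s.drop (fn + 2) := by
      obtain ⟨u2, hu2⟩ := hpre
      have hdu : s.drop (fn + 2) = u2 := by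
        have := congrArg (List.drop 2) hu2
        simp at this
        exact this.symm
      rw [List.drop_zero]
      conv_lhs => rw [← List.take_append_drop fn s]
      rw [← hu2, hdu]
      simp
    obtain ⟨hd2, ht2, hle2, hlt2⟩ :=
      pvTakeStep ':' [':'] s 0 (s.take fn) (s.drop (fn + 2)) p2 ps2 (by omega) hsdec hsp2
    simp only [Nat.zero_add, hhl, List.length_singleton, Nat.reduceAdd] at hd2 ht2 hle2 hlt2
    -- unfold one step of the colon loop
    rw [pvFindLoop]
    rw [hstep]
    have hnegfn : ¬ ((fn : Int) = -1) := by omega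
    rw [if_neg hnegfn]
    have hcast2 : (fn : Int) + (([':', ':'] : List Char).length : Nat) = ((fn + 2 : Nat) : Int) := by
      simp only [List.length_cons, List.length_nil]
      push_cast; ring
    rw [hcast2]
    rw [pvMain ':' [':'] s ps2 s.length (fn + 2) p2 _ (by omega) (by omega) hsp2]
    -- B side
    have hslhead' : PySem.Chars.slice s none (some ((fn : Nat) : Int)) = s.take fn := by
      rw [← hfcast]; exact hslhead
    have hslice2 : PySem.Chars.slice s (some ((fn : Int) + 2)) none = s.drop (fn + 2) := by
      have h2 : ((fn : Int) + 2) = ((fn + 2 : Nat) : Int) := by omega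
      rw [h2, PySem.Chars.slice_eq_listSlice, PySem.List.slice_from_natCast]
    rw [hslhead', hslice2]
    rw [pvSplitOnEq '/' [] (s.take fn), hsp]
    simp only [List.headD_cons, List.tail_cons]
    rw [hwacc, pvSplitOnEq ':' [':'] (s.drop (fn + 2)), hsp2, pvWalkConsSnd, ht2]
    have hgd : (s.take fn = []) ↔ fn = 0 := by
      rw [List.take_eq_nil_iff]; simp [hsne]
    rw [if_neg hsne]
    by_cases h0 : fn = 0
    · rw [if_neg (by omega : ¬ ((0 : Int) < (fn : Nat))), if_pos (hgd.mpr h0)]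
      simp [List.append_assoc]
    · rw [if_pos (by omega : ((0 : Int) < (fn : Nat))), if_neg (fun hc => h0 (hgd.mp hc))]
      simp [List.append_assoc]
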